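-- pv_equiv track=rewrite | github.com/google-research/google-research | simpdom/extract_xpaths.py | xpath_distance
-- ===== SOURCE A (Python) =====
-- def xpath_distance(path1, path2):
--   """Quantify the difference between two xpaths."""
--
--   # For example:
--   # xpath_distance('/div/body/div[2]/table[1]/tr[2]/td[3]/div/div[4]/span',
--   #                '/div/body/div[2]/table[1]/tr[2]/td[2]/h2') = 3
--   formatting_tags = {
--       "strong", "a", "b", "font", "br", "span", "tail", "em", "img", "u", "i"
--   }
--
--   def clean_tag(path):
--     path = [x.split("[")[0] for x in path.split("/")]
--     return list(filter(lambda x: x not in formatting_tags, path))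
--
--   path_list1 = clean_tag(path1)
--   path_list2 = clean_tag(path2)
--   distance = abs(len(path_list1) - len(path_list2))
--   for i in range(min(len(path_list1), len(path_list2))):
--     if path_list1[i] != path_list2[i]:
--       distance += 1
--   return distance
-- ===== SOURCE B (Python) =====
-- def xpath_distance(path1, path2):
--   """Quantify the difference between two xpaths."""
--   formatting_tags = {
--       "strong", "a", "b", "font", "br", "span", "tail", "em", "img", "u", "i"
--   }
--
--   def clean_tag(path):
--     path = [x.split("[")[0] for x in path.split("/")]
--     return list(filter(lambda x: x not in formatting_tags, path))
--
--   def mismatches(l1, l2):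
--     # structural recursion on both lists at once: a missing tail counts
--     # one per leftover element, a present pair counts one iff it differs
--     if not l1:
--       return len(l2)
--     if not l2:
--       return len(l1)
--     return int(l1[0] != l2[0]) + mismatches(l1[1:], l2[1:])
--
--   return mismatches(clean_tag(path1), clean_tag(path2))
-- ===== Notes on version B (the rewrite author's own statement) =====
-- stated objective: alternative
-- what changed: Replaces A's two-part distance (abs length difference plus an index loop over the common prefix) with a single structural recursion over both cleaned tag lists that counts one per differing pair and one per leftover tail element.
import Mathlib
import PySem

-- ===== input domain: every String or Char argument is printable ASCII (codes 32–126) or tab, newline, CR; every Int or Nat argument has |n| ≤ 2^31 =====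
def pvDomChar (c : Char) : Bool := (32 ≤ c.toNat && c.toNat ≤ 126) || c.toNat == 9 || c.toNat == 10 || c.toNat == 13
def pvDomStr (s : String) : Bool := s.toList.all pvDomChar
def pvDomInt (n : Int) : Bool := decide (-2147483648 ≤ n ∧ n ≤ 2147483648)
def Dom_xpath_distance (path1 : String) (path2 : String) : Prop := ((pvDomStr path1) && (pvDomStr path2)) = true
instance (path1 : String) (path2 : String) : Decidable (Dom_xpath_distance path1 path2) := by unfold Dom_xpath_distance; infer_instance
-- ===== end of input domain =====

-- B replaces A's two-part distance (abs length difference + index loop over the common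
-- prefix) with one structural recursion over both cleaned tag lists; alternative, same cost.


-- ===== PORT A =====
def pvFormattingTags : List String :=
  ["strong", "a", "b", "font", "br", "span", "tail", "em", "img", "u", "i"]

-- x.split("[")[0]: the separator is nonempty so split? is `some`, and Python's split
-- always yields a nonempty list, so index [0] is its head — exact on all inputs
def pvHeadSplit (x : String) : String :=
  ((PySem.Str.split? x "[").getD []).headD ""

-- clean_tag (shared by both Pythons verbatim): split on '/', strip '[...]', drop formatting tags
def pvCleanTag (path : String) : List String :=
  (((PySem.Str.split? path "/").getD []).map pvHeadSplit).filter
    (fun x => !(pvFormattingTags.contains x))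

def xpath_distance (path1 : String) (path2 : String) : Int :=
  let l1 := pvCleanTag path1
  let l2 := pvCleanTag path2
  let d0 : Int := |(l1.length : Int) - (l2.length : Int)|
  (PySem.List.pyRange 0 ((min l1.length l2.length : Nat) : Int)).foldl
    (fun d i => if PySem.List.pyGetD l1 i "" ≠ PySem.List.pyGetD l2 i "" then d + 1 else d) d0

-- ===== PORT B =====
-- mismatches(l1, l2): structural recursion on both lists at once
def pvMismatch : List String → List String → Int
  | [], l2 => (l2.length : Int)
  | l1, [] => (l1.length : Int)
  | a :: t1, b :: t2 => (if a ≠ b then 1 else 0) + pvMismatch t1 t2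

def xpath_distance_alt (path1 : String) (path2 : String) : Int :=
  pvMismatch (pvCleanTag path1) (pvCleanTag path2)

-- ===== PRECONDITION & SPEC =====
def Spec_xpath_distance (path1 : String) (path2 : String) (out : Int) : Prop := out = xpath_distance_alt path1 path2
instance (path1 : String) (path2 : String) (out : Int) : Decidable (Spec_xpath_distance path1 path2 out) := by unfold Spec_xpath_distance; infer_instance

-- ===== CLAIM (what is proved, stated in full; the proofs are below) =====
def Claim_equal_xpath_distance : Prop := ∀ (path1 : String) (path2 : String), Dom_xpath_distance path1 path2 → Spec_xpath_distance path1 path2 (xpath_distance path1 path2)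

-- ===== LEMMAS AND PROOFS =====

-- A's |len₁-len₂| plus the number of mismatching common-prefix positions is B's recursion
lemma pv_abs_add_count (l1 l2 : List String) :
    |(l1.length : Int) - (l2.length : Int)|
      + ((List.range (min l1.length l2.length)).countP
          (fun j => !(l1.getD j "" == l2.getD j ""))) = pvMismatch l1 l2 := by
  induction l1 generalizing l2 with
  | nil =>
    simp only [List.length_nil, Nat.zero_min, List.range_zero, List.countP_nil,
      Nat.cast_zero, add_zero, pvMismatch.eq_def]
    rw [abs_of_nonpos (by omega)]
    cases l2 <;> simp
  | cons a t1 ih =>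
    cases l2 with
    | nil =>
      simp only [List.length_nil, Nat.min_zero, List.range_zero, List.countP_nil,
        Nat.cast_zero, add_zero, pvMismatch]
      rw [abs_of_nonneg (by omega)]; omega
    | cons b t2 =>
      simp only [List.length_cons, Nat.succ_min_succ, List.range_succ_eq_map,
        List.countP_cons, List.countP_map, pvMismatch]
      have hfun : ((fun j => !((a :: t1).getD j "" == (b :: t2).getD j "")) ∘ Nat.succ)
          = (fun j => !(t1.getD j "" == t2.getD j "")) := by
        funext j; simp
      rw [hfun]
      have habs : |((t1.length + 1 : Nat) : Int) - ((t2.length + 1 : Nat) : Int)|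
          = |(t1.length : Int) - (t2.length : Int)| := by
        congr 1; push_cast; ring
      have h := ih t2
      simp only [List.getD_eq_getElem?_getD] at h ⊢
      rw [habs]
      by_cases hab : a = b <;> simp [hab] <;> omega

-- A's whole computation on two cleaned lists equals B's recursion
lemma pv_fold_eq_mismatch (l1 l2 : List String) :
    (PySem.List.pyRange 0 ((min l1.length l2.length : Nat) : Int)).foldl
      (fun d i => if PySem.List.pyGetD l1 i "" ≠ PySem.List.pyGetD l2 i "" then d + 1 else d)
      (|(l1.length : Int) - (l2.length : Int)|) = pvMismatch l1 l2 := by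
  rw [PySem.List.pyRange_zero_natCast, List.foldl_map]
  simp only [PySem.List.pyGetD_natCast]
  have hconv : (fun (d : Int) (i : Nat) => if l1.getD i "" ≠ l2.getD i "" then d + 1 else d)
      = (fun d i => if (fun j => !(l1.getD j "" == l2.getD j "")) i = true then d + 1 else d) := by
    funext d i; simp
  rw [hconv, PySem.List.foldl_count_if]
  exact pv_abs_add_count l1 l2

-- ===== VERDICT (by name: the statement is the Claim_ definition above) =====
theorem xpath_distance_spec : Claim_equal_xpath_distance := by
  intro path1 path2 _
  unfold Spec_xpath_distance xpath_distance xpath_distance_alt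
  exact pv_fold_eq_mismatch _ _
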